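-- pv_equiv track=rewrite | github.com/otthtml/zettel-python | competitive/digrams.py | solution
-- ===== SOURCE A (Python) =====
-- def solution(S):
--     maxi = -1
--     for i in range(len(S) - 1):
--         digram = S[i] + S[i+1]
--         furthest = S.rfind(digram)
--         if i != furthest:
--             if furthest - i > maxi:
--                 maxi = furthest - i
--
--     return maxi
-- ===== SOURCE B (Python) =====
-- def solution(S):
--     first = {}
--     maxi = -1
--     for i in range(len(S) - 1):
--         dg = S[i:i+2]
--         if dg in first:
--             d = i - first[dg]
--             if d > maxi:
--                 maxi = d
--         else:
--             first[dg] = i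
--     return maxi
-- ===== Notes on version B (the rewrite author's own statement) =====
-- stated objective: faster
-- what changed: replaces the per-position rfind rescan of the whole string with a single pass keeping a dict of each digram's first occurrence, so the answer is max(i - first[digram])
import Mathlib
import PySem

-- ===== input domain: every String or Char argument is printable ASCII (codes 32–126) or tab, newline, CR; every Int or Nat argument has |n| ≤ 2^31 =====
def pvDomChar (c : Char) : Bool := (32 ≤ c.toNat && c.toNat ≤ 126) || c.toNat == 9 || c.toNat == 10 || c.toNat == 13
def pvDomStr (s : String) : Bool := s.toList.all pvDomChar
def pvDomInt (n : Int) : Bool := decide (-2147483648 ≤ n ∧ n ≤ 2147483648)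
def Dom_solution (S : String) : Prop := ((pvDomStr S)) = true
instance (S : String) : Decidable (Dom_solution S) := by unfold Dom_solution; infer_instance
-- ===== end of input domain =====

-- B replaces A's per-position whole-string rfind rescan by one pass with a dict of each digram's
-- first occurrence (objective: faster); same return value on every input.

-- ===== PORT A =====
-- the digram (S[i], S[i+1]) (both indices in range on every use, so getD is exact)
def pvDg (L : List Char) (i : Nat) : Char × Char := (L.getD i ' ', L.getD (i+1) ' ')

-- hand port of S.rfind(digram) for the 2-char digram S[i]+S[i+1]: Python scans exactly the start
-- positions 0..len(S)-2 and returns the greatest j with S[j:j+2] = digram (some j matches, j = i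
-- does); keeping the last match of a left-to-right scan returns that same greatest index.
def pvRfind2 (L : List Char) (p : Char × Char) : Int :=
  (List.range (L.length - 1)).foldl (fun acc j => if pvDg L j = p then (j : Int) else acc) (-1)

def solution (S : String) : Int :=
  let L := S.toList
  (List.range (L.length - 1)).foldl
    (fun maxi i =>
      let furthest := pvRfind2 L (pvDg L i)
      if (i : Int) ≠ furthest then
        if furthest - (i : Int) > maxi then furthest - (i : Int) else maxi
      else maxi)
    (-1)

-- ===== PORT B =====
-- one loop step of B: if the digram was seen before, update maxi with i - first[dg]; else record i
def pvStepB (L : List Char) (st : PySem.Dict (Char × Char) Int × Int) (i : Nat) :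
    PySem.Dict (Char × Char) Int × Int :=
  match st.1.get? (pvDg L i) with
  | some f => (st.1, if (i : Int) - f > st.2 then (i : Int) - f else st.2)
  | none => (st.1.insert (pvDg L i) (i : Int), st.2)

def solution_alt (S : String) : Int :=
  let L := S.toList
  ((List.range (L.length - 1)).foldl (pvStepB L) (PySem.Dict.empty, -1)).2

-- ===== PRECONDITION & SPEC =====
def Spec_solution (S : String) (out : Int) : Prop := out = solution_alt S
instance (S : String) (out : Int) : Decidable (Spec_solution S out) := by unfold Spec_solution; infer_instance

-- ===== CLAIM (what is proved, stated in full; the proofs are below) =====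
def Claim_equal_solution : Prop := ∀ (S : String), Dom_solution S → Spec_solution S (solution S)

-- ===== LEMMAS AND PROOFS =====

-- occurrence positions of digram p among start positions < k
def occSet (L : List Char) (k : Nat) (p : Char × Char) : Finset ℕ :=
  (Finset.range k).filter (fun j => pvDg L j = p)

-- first occurrence of p among positions < k (k if none)
def pvFirst (L : List Char) (k : Nat) (p : Char × Char) : Nat :=
  if h : (occSet L k p).Nonempty then (occSet L k p).min' h else k

lemma mem_occSet {L : List Char} {k : Nat} {p : Char × Char} {j : Nat} :
    j ∈ occSet L k p ↔ j < k ∧ pvDg L j = p := by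
  simp [occSet]

lemma occSet_succ_self {L : List Char} {k : Nat} {p : Char × Char} (hm : pvDg L k = p) :
    occSet L (k+1) p = insert k (occSet L k p) := by
  ext j
  simp only [mem_occSet, Finset.mem_insert]
  constructor
  · rintro ⟨hj, hd⟩
    rcases Nat.lt_succ_iff_lt_or_eq.mp hj with h | rfl
    · exact Or.inr ⟨h, hd⟩
    · exact Or.inl rfl
  · rintro (rfl | ⟨hj, hd⟩)
    · exact ⟨Nat.lt_succ_self _, hm⟩
    · exact ⟨Nat.lt_succ_of_lt hj, hd⟩

lemma occSet_succ_ne {L : List Char} {k : Nat} {p : Char × Char} (hm : pvDg L k ≠ p) :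
    occSet L (k+1) p = occSet L k p := by
  ext j
  simp only [mem_occSet]
  constructor
  · rintro ⟨hj, hd⟩
    rcases Nat.lt_succ_iff_lt_or_eq.mp hj with h | rfl
    · exact ⟨h, hd⟩
    · exact absurd hd hm
  · rintro ⟨hj, hd⟩
    exact ⟨Nat.lt_succ_of_lt hj, hd⟩

lemma pvFirst_mem {L : List Char} {k : Nat} {p : Char × Char} (h : (occSet L k p).Nonempty) :
    pvFirst L k p < k ∧ pvDg L (pvFirst L k p) = p := by
  have : pvFirst L k p ∈ occSet L k p := by
    rw [pvFirst, dif_pos h]; exact Finset.min'_mem _ _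
  exact mem_occSet.mp this

lemma pvFirst_le {L : List Char} {k : Nat} {p : Char × Char} {j : Nat} (hj : j ∈ occSet L k p) :
    pvFirst L k p ≤ j := by
  rw [pvFirst, dif_pos ⟨j, hj⟩]; exact Finset.min'_le _ _ hj

lemma pvFirst_succ_of_nonempty {L : List Char} {k : Nat} {p : Char × Char}
    (hq : (occSet L k p).Nonempty) : pvFirst L (k+1) p = pvFirst L k p := by
  obtain ⟨hlt, hd⟩ := pvFirst_mem hq
  apply le_antisymm
  · exact pvFirst_le (mem_occSet.mpr ⟨Nat.lt_succ_of_lt hlt, hd⟩)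
  · have hne' : (occSet L (k+1) p).Nonempty := by
      obtain ⟨j, hj⟩ := hq
      obtain ⟨h1, h2⟩ := mem_occSet.mp hj
      exact ⟨j, mem_occSet.mpr ⟨Nat.lt_succ_of_lt h1, h2⟩⟩
    obtain ⟨hlt', hd'⟩ := pvFirst_mem hne'
    rcases Nat.lt_succ_iff_lt_or_eq.mp hlt' with h | h
    · exact pvFirst_le (mem_occSet.mpr ⟨h, hd'⟩)
    · omega
lemma pvFirst_succ_of_empty {L : List Char} {k : Nat} {p : Char × Char}
    (hq : ¬ (occSet L k p).Nonempty) (hm : pvDg L k = p) : pvFirst L (k+1) p = k := by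
  have hset : occSet L (k+1) p = {k} := by
    rw [occSet_succ_self hm, Finset.not_nonempty_iff_eq_empty.mp hq]
    rfl
  rw [pvFirst, dif_pos (by rw [hset]; exact ⟨k, Finset.mem_singleton_self k⟩)]
  simp [hset]

lemma if_gt_eq_max (m x : Int) : (if x > m then x else m) = max m x := by
  rw [max_def]; split_ifs <;> omega

lemma foldl_max_le_iff (l : List Int) (a b : Int) :
    l.foldl max a ≤ b ↔ a ≤ b ∧ ∀ x ∈ l, x ≤ b := by
  induction l generalizing a with
  | nil => simp
  | cons x t ih =>
      simp only [List.foldl_cons, ih, max_le_iff, List.mem_cons]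
      constructor
      · rintro ⟨⟨ha, hx⟩, ht⟩
        refine ⟨ha, fun y hy => ?_⟩
        rcases hy with rfl | hy
        · exact hx
        · exact ht y hy
      · rintro ⟨ha, h⟩
        exact ⟨⟨ha, h x (Or.inl rfl)⟩, fun y hy => h y (Or.inr hy)⟩

lemma le_foldl_max_init (l : List Int) (a : Int) : a ≤ l.foldl max a :=
  ((foldl_max_le_iff l a _).mp le_rfl).1

lemma le_foldl_max_mem {l : List Int} {x : Int} (h : x ∈ l) (a : Int) : x ≤ l.foldl max a :=
  ((foldl_max_le_iff l a _).mp le_rfl).2 x h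

lemma foldl_max_eq_dominates (l1 l2 : List Int)
    (h1 : ∀ x ∈ l1, ∃ y ∈ l2, x ≤ y) (h2 : ∀ x ∈ l2, ∃ y ∈ l1, x ≤ y) :
    l1.foldl max (-1) = l2.foldl max (-1) := by
  apply le_antisymm
  · rw [foldl_max_le_iff]
    refine ⟨le_foldl_max_init _ _, fun x hx => ?_⟩
    obtain ⟨y, hy, hxy⟩ := h1 x hx
    exact le_trans hxy (le_foldl_max_mem hy _)
  · rw [foldl_max_le_iff]
    refine ⟨le_foldl_max_init _ _, fun x hx => ?_⟩
    obtain ⟨y, hy, hxy⟩ := h2 x hx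
    exact le_trans hxy (le_foldl_max_mem hy _)

lemma foldl_if_max (c : Nat → Bool) (v : Nat → Int) (R : List Nat) (a : Int) :
    R.foldl (fun m i => if c i then max m (v i) else m) a
      = ((R.filter c).map v).foldl max a := by
  induction R generalizing a with
  | nil => rfl
  | cons x t ih =>
      by_cases hx : c x = true <;> simp [List.foldl_cons, hx, ih]

lemma pick_last (L : List Char) (p : Char × Char) (m : Nat) (a : Int) :
    (List.range m).foldl (fun acc j => if pvDg L j = p then (j : Int) else acc) a
      = if h : (occSet L m p).Nonempty then (((occSet L m p).max' h : Nat) : Int) else a := by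
  induction m generalizing a with
  | zero => simp [occSet]
  | succ m ih =>
      rw [List.range_succ, List.foldl_append]
      simp only [List.foldl_cons, List.foldl_nil]
      by_cases hm : pvDg L m = p
      · have hne : (occSet L (m+1) p).Nonempty := by
          rw [occSet_succ_self hm]; exact ⟨m, Finset.mem_insert_self _ _⟩
        have hmax : (occSet L (m+1) p).max' hne = m := by
          apply le_antisymm
          · apply Finset.max'_le
            intro y hy
            have := (mem_occSet.mp hy).1
            omega
          · apply Finset.le_max'
            rw [occSet_succ_self hm]; exact Finset.mem_insert_self _ _
        rw [if_pos hm, dif_pos hne, hmax]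
      · rw [if_neg hm, ih, occSet_succ_ne hm]

lemma rfind2_eq (L : List Char) (p : Char × Char) (h : (occSet L (L.length - 1) p).Nonempty) :
    pvRfind2 L p = (((occSet L (L.length - 1) p).max' h : Nat) : Int) := by
  rw [pvRfind2, pick_last, dif_pos h]

lemma self_mem_occSet {L : List Char} {i : Nat} (hi : i < L.length - 1) :
    i ∈ occSet L (L.length - 1) (pvDg L i) := mem_occSet.mpr ⟨hi, rfl⟩

-- B invariant: after processing positions < k the dict maps each digram seen to its first
-- occurrence, and maxi is the running max of i - first over positions whose digram was seen before
lemma B_invariant (L : List Char) (k : Nat) :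
    (∀ p, ((List.range k).foldl (pvStepB L) (PySem.Dict.empty, -1)).1.get? p
        = if (occSet L k p).Nonempty then some ((pvFirst L k p : Nat) : Int) else none)
    ∧ ((List.range k).foldl (pvStepB L) (PySem.Dict.empty, -1)).2
        = (((List.range k).filter (fun (i : Nat) => decide (occSet L i (pvDg L i)).Nonempty)).map
            (fun (i : Nat) => (i : Int) - ((pvFirst L i (pvDg L i) : Nat) : Int))).foldl max (-1) := by
  induction k with
  | zero =>
      constructor
      · intro p
        simp [occSet, PySem.Dict.get?_empty]
      · rfl
  | succ k ih =>
      obtain ⟨ihd, ihm⟩ := ih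
      rw [List.range_succ, List.foldl_append]
      simp only [List.foldl_cons, List.foldl_nil]
      set st := (List.range k).foldl (pvStepB L) (PySem.Dict.empty, -1) with hst
      by_cases hq : (occSet L k (pvDg L k)).Nonempty
      · have hget : st.1.get? (pvDg L k) = some ((pvFirst L k (pvDg L k) : Nat) : Int) := by
          rw [ihd (pvDg L k), if_pos hq]
        have hstep : pvStepB L st k
            = (st.1, if (k : Int) - ((pvFirst L k (pvDg L k) : Nat) : Int) > st.2
                then (k : Int) - ((pvFirst L k (pvDg L k) : Nat) : Int) else st.2) := by
          simp only [pvStepB, hget]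
        rw [hstep]
        constructor
        · intro p
          by_cases hp : pvDg L k = p
          · subst hp
            have hne' : (occSet L (k+1) (pvDg L k)).Nonempty := by
              obtain ⟨j, hj⟩ := hq
              obtain ⟨h1, h2⟩ := mem_occSet.mp hj
              exact ⟨j, mem_occSet.mpr ⟨Nat.lt_succ_of_lt h1, h2⟩⟩
            rw [ihd (pvDg L k), if_pos hq, if_pos hne', pvFirst_succ_of_nonempty hq]
          · rw [ihd p, occSet_succ_ne hp]
            by_cases hp' : (occSet L k p).Nonempty
            · rw [if_pos hp', if_pos hp', pvFirst_succ_of_nonempty hp']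
            · rw [if_neg hp', if_neg hp']
        · rw [ihm, List.filter_append, List.map_append, List.foldl_append]
          have hck : (fun (i : Nat) => decide (occSet L i (pvDg L i)).Nonempty) k = true :=
            decide_eq_true hq
          simp only [List.filter_cons, List.filter_nil, hck, if_pos, List.map_cons, List.map_nil,
            List.foldl_cons, List.foldl_nil]
          exact if_gt_eq_max _ _
      · have hget : st.1.get? (pvDg L k) = none := by
          rw [ihd (pvDg L k), if_neg hq]
        have hstep : pvStepB L st k = (st.1.insert (pvDg L k) ((k : Nat) : Int), st.2) := by
          simp only [pvStepB, hget]
        rw [hstep]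
        constructor
        · intro p
          by_cases hp : pvDg L k = p
          · subst hp
            have hne' : (occSet L (k+1) (pvDg L k)).Nonempty := by
              rw [occSet_succ_self rfl]; exact ⟨k, Finset.mem_insert_self _ _⟩
            rw [PySem.Dict.get?_insert_self, if_pos hne', pvFirst_succ_of_empty hq rfl]
          · rw [PySem.Dict.get?_insert_of_ne _ _ (fun h => hp h.symm), ihd p, occSet_succ_ne hp]
            by_cases hp' : (occSet L k p).Nonempty
            · rw [pvFirst_succ_of_nonempty hp']
            · rw [if_neg hp', if_neg hp']
        · rw [ihm, List.filter_append, List.map_append, List.foldl_append]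
          have hck : (fun (i : Nat) => decide (occSet L i (pvDg L i)).Nonempty) k = false := by
            simp [hq]
          simp only [List.filter_cons, List.filter_nil, hck]
          simp

-- the per-i contributions of A (rfind(dg) - i, when i is not the last occurrence) and of B
-- (i - first(dg), when the digram was seen before i) have the same maximum
lemma lists_eq (L : List Char) :
    ((((List.range (L.length - 1)).filter
        (fun (i : Nat) => decide ((i : Int) ≠ pvRfind2 L (pvDg L i)))).map
        (fun (i : Nat) => pvRfind2 L (pvDg L i) - (i : Int))).foldl max (-1))
      = ((((List.range (L.length - 1)).filter
        (fun (i : Nat) => decide (occSet L i (pvDg L i)).Nonempty)).map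
        (fun (i : Nat) => (i : Int) - ((pvFirst L i (pvDg L i) : Nat) : Int))).foldl max (-1)) := by
  apply foldl_max_eq_dominates
  · intro x hx
    simp only [List.mem_map, List.mem_filter, List.mem_range] at hx
    obtain ⟨i, ⟨hi, hcA⟩, rfl⟩ := hx
    have hiocc : i ∈ occSet L (L.length - 1) (pvDg L i) := self_mem_occSet hi
    have hne : (occSet L (L.length - 1) (pvDg L i)).Nonempty := ⟨i, hiocc⟩
    have hr := rfind2_eq L (pvDg L i) hne
    set g := (occSet L (L.length - 1) (pvDg L i)).max' hne with hg
    have hgmem : g ∈ occSet L (L.length - 1) (pvDg L i) := Finset.max'_mem _ _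
    have hig : i ≤ g := Finset.le_max' _ _ hiocc
    have hine : (i : Int) ≠ (g : Int) := by
      have := of_decide_eq_true hcA
      rwa [hr] at this
    have higlt : i < g := by omega
    obtain ⟨hgn1, hgd⟩ := mem_occSet.mp hgmem
    have hiog : i ∈ occSet L g (pvDg L g) := mem_occSet.mpr ⟨higlt, by rw [hgd]⟩
    refine ⟨(g : Int) - ((pvFirst L g (pvDg L g) : Nat) : Int), ?_, ?_⟩
    · simp only [List.mem_map, List.mem_filter, List.mem_range]
      exact ⟨g, ⟨hgn1, decide_eq_true ⟨i, hiog⟩⟩, rfl⟩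
    · have hfle : pvFirst L g (pvDg L g) ≤ i := pvFirst_le hiog
      rw [hr]
      omega
  · intro x hx
    simp only [List.mem_map, List.mem_filter, List.mem_range] at hx
    obtain ⟨i, ⟨hi, hcB⟩, rfl⟩ := hx
    have hne' : (occSet L i (pvDg L i)).Nonempty := of_decide_eq_true hcB
    obtain ⟨hflt, hfd⟩ := pvFirst_mem hne'
    set f := pvFirst L i (pvDg L i) with hf
    have hfn1 : f < L.length - 1 := lt_trans hflt hi
    have hiocc : i ∈ occSet L (L.length - 1) (pvDg L i) := self_mem_occSet hi
    have hnef : (occSet L (L.length - 1) (pvDg L f)).Nonempty := by rw [hfd]; exact ⟨i, hiocc⟩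
    have hr := rfind2_eq L (pvDg L f) hnef
    set g := (occSet L (L.length - 1) (pvDg L f)).max' hnef with hg
    have hig : i ≤ g := by
      apply Finset.le_max'
      rw [hfd]
      exact hiocc
    refine ⟨pvRfind2 L (pvDg L f) - (f : Int), ?_, ?_⟩
    · simp only [List.mem_map, List.mem_filter, List.mem_range]
      refine ⟨f, ⟨hfn1, decide_eq_true ?_⟩, rfl⟩
      rw [hr]
      intro h
      have : f = g := by omega
      omega
    · rw [hr]
      omega

-- the two folds of the ports compute the same value
lemma main_eq (L : List Char) :
    (List.range (L.length - 1)).foldl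
      (fun maxi i =>
        let furthest := pvRfind2 L (pvDg L i)
        if (i : Int) ≠ furthest then
          if furthest - (i : Int) > maxi then furthest - (i : Int) else maxi
        else maxi)
      (-1)
    = ((List.range (L.length - 1)).foldl (pvStepB L) (PySem.Dict.empty, -1)).2 := by
  have hfun : (fun (maxi : Int) (i : Nat) =>
        let furthest := pvRfind2 L (pvDg L i)
        if (i : Int) ≠ furthest then
          if furthest - (i : Int) > maxi then furthest - (i : Int) else maxi
        else maxi)
      = fun (m : Int) (i : Nat) =>
        if (fun (i : Nat) => decide ((i : Int) ≠ pvRfind2 L (pvDg L i))) i then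
          max m ((fun (i : Nat) => pvRfind2 L (pvDg L i) - (i : Int)) i) else m := by
    funext m i
    by_cases h : (i : Int) ≠ pvRfind2 L (pvDg L i)
    · simp [h, if_gt_eq_max]
    · simp [h]
  rw [hfun, foldl_if_max, (B_invariant L (L.length - 1)).2]
  exact lists_eq L

-- ===== VERDICT (by name: the statement is the Claim_ definition above) =====
theorem solution_spec : Claim_equal_solution := by
  intro S _
  unfold Spec_solution
  exact main_eq S.toList
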